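-- pv_equiv track=rewrite | github.com/lufeidasheng/sanhua-system | tools/compact_session_cache_noise.py | compact_recent_actions
-- ===== SOURCE A (Python) =====
-- from typing import Any, Dict, List, Tuple
--
-- def compact_recent_actions(actions: List[Dict[str, Any]], keep_max: int = 16) -> Tuple[List[Dict[str, Any]], int]:
--     """
--     规则：
--     1. 对 memory.consolidate / aicore.shutdown 这类低价值动作，只保留最新 1 条
--     2. degraded / failed 的动作优先保留
--     3. 最终只保留最新 keep_max 条
--     """
--     if not isinstance(actions, list):
--         return [], 0
--
--     noisy_singletons = {
--         "memory.consolidate",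
--         "aicore.shutdown",
--     }
--
--     newest_noisy: Dict[str, Dict[str, Any]] = {}
--     valuable: List[Dict[str, Any]] = []
--
--     for act in actions:
--         if not isinstance(act, dict):
--             continue
--         name = str(act.get("action_name", "")).strip()
--         status = str(act.get("status", "")).strip().lower()
--         ts = str(act.get("timestamp", ""))
--
--         if name in noisy_singletons:
--             old = newest_noisy.get(name)
--             if old is None or ts >= str(old.get("timestamp", "")):
--                 newest_noisy[name] = act
--         else:
--             valuable.append(act)
--
--     kept = valuable + list(newest_noisy.values())
--     kept.sort(key=lambda x: str(x.get("timestamp", "")))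
--
--     removed = max(0, len(actions) - len(kept))
--
--     if len(kept) > keep_max:
--         # 优先保留 degraded / failed
--         important = [x for x in kept if str(x.get("status", "")).lower() in {"degraded", "failed", "error"}]
--         normal = [x for x in kept if x not in important]
--         important.sort(key=lambda x: str(x.get("timestamp", "")))
--         normal.sort(key=lambda x: str(x.get("timestamp", "")))
--
--         merged = important + normal
--         kept = merged[-keep_max:]
--         kept.sort(key=lambda x: str(x.get("timestamp", "")))
--         removed = max(0, len(actions) - len(kept))
--
--     return kept, removed
-- ===== SOURCE B (Python) =====
-- def compact_recent_actions(actions, keep_max=16):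
--     NOISY = ("memory.consolidate", "aicore.shutdown")
--
--     def get(a, k):
--         return str(a.get(k, ""))
--
--     def ts(a):
--         return get(a, "timestamp")
--
--     def name(a):
--         return get(a, "action_name").strip()
--
--     def noisy(a):
--         return name(a) in NOISY
--
--     def important(a):
--         return get(a, "status").lower() in ("degraded", "failed", "error")
--
--     # one newest representative per noisy action name (last occurrence on timestamp ties)
--     names = list(dict.fromkeys(name(a) for a in actions if noisy(a)))
--     picks = [max(reversed([a for a in actions if name(a) == n]), key=ts) for n in names]
--     valuable = [a for a in actions if not noisy(a)]
--
--     kept = sorted(valuable + picks, key=ts)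
--     if len(kept) > keep_max:
--         merged = [x for x in kept if important(x)] + [x for x in kept if not important(x)]
--         kept = sorted(merged[-keep_max:], key=ts)
--     return kept, max(0, len(actions) - len(kept))
-- ===== Notes on version B (the rewrite author's own statement) =====
-- stated objective: simpler
-- what changed: B replaces A's running newest-noisy dict (replace-on-ts>=) and its quadratic `x not in important` partition with redundant re-sorts by a direct decomposition: dedup the noisy names, pick each name's newest entry with max(reversed(group), key=ts), filter the valuable items, and in the over-limit branch split kept once with a complement filter before the tail slice.
import Mathlib
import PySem

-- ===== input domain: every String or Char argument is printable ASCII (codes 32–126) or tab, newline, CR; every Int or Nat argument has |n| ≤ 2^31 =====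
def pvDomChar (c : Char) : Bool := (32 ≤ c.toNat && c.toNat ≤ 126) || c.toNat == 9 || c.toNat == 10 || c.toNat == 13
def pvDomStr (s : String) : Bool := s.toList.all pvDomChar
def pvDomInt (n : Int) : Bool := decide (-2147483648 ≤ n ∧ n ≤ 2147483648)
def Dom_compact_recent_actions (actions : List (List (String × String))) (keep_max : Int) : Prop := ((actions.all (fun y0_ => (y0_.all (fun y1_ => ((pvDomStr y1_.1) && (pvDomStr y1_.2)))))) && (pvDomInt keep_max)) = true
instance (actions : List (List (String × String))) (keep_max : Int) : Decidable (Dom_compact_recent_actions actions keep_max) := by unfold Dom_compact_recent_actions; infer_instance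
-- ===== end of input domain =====

-- B replaces A's running "newest noisy" dict and quadratic `x not in important` partition by a
-- dedup-names / per-name max / complement-filter decomposition (objective: simpler; return value only).

-- ===== PORT A =====
-- shared field accessors: str(act.get(k, "")), the stripped name, the lowered status test
def pvGet (a : List (String × String)) (k : String) : String :=
  (PySem.Dict.mk a).getD k ""

def pvTs (a : List (String × String)) : String := pvGet a "timestamp"

def pvName (a : List (String × String)) : String := PySem.Str.strip (pvGet a "action_name")

def pvImp (a : List (String × String)) : Bool :=
  let s := PySem.Str.lower (pvGet a "status")
  s == "degraded" || s == "failed" || s == "error"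

-- the body of A's `for act in actions` loop (state: newest_noisy dict, valuable list);
-- the loop's `status` local is never used by A and is omitted
def pvStepA (st : PySem.Dict String (List (String × String)) × List (List (String × String)))
    (act : List (String × String)) :
    PySem.Dict String (List (String × String)) × List (List (String × String)) :=
  let name := pvName act
  let ts := pvTs act
  if name == "memory.consolidate" || name == "aicore.shutdown" then
    match st.1.get? name with
    | none => (st.1.insert name act, st.2)
    | some old => if pvTs old ≤ ts then (st.1.insert name act, st.2) else st
  else (st.1, st.2 ++ [act])

def compact_recent_actions (actions : List (List (String × String))) (keep_max : Int) :
    (List (List (String × String))) × Int :=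
  let st := actions.foldl pvStepA (PySem.Dict.mk [], [])
  let kept := PySem.List.sorted (st.2 ++ st.1.values) pvTs
  let removed := max 0 (PySem.List.len actions - PySem.List.len kept)
  if PySem.List.len kept > keep_max then
    let important := kept.filter (fun x => pvImp x)
    let normal := kept.filter (fun x => !(important.contains x))
    let important2 := PySem.List.sorted important pvTs
    let normal2 := PySem.List.sorted normal pvTs
    let merged := important2 ++ normal2
    let kept2 := PySem.List.sorted (PySem.List.slice merged (some (-keep_max)) none) pvTs
    (kept2, max 0 (PySem.List.len actions - PySem.List.len kept2))
  else
    (kept, removed)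

-- ===== PORT B =====
def pvNoisy (a : List (String × String)) : Bool :=
  pvName a == "memory.consolidate" || pvName a == "aicore.shutdown"

-- max(reversed(g), key=ts): the group is nonempty wherever this is applied, so `.getD []` is never used
def pvPick (g : List (List (String × String))) : List (String × String) :=
  (PySem.List.max? g.reverse pvTs).getD []

def compact_recent_actions_alt (actions : List (List (String × String))) (keep_max : Int) :
    (List (List (String × String))) × Int :=
  let names := PySem.List.dedup ((actions.filter (fun a => pvNoisy a)).map pvName)
  let picks := names.map (fun n => pvPick (actions.filter (fun a => pvName a == n)))
  let valuable := actions.filter (fun a => !pvNoisy a)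
  let kept := PySem.List.sorted (valuable ++ picks) pvTs
  let kept2 :=
    if PySem.List.len kept > keep_max then
      PySem.List.sorted
        (PySem.List.slice (kept.filter (fun x => pvImp x) ++ kept.filter (fun x => !pvImp x))
          (some (-keep_max)) none) pvTs
    else kept
  (kept2, max 0 (PySem.List.len actions - PySem.List.len kept2))

-- ===== PRECONDITION & SPEC =====
def Spec_compact_recent_actions (actions : List (List (String × String))) (keep_max : Int) (out : (List (List (String × String))) × Int) : Prop := out = compact_recent_actions_alt actions keep_max
instance (actions : List (List (String × String))) (keep_max : Int) (out : (List (List (String × String))) × Int) : Decidable (Spec_compact_recent_actions actions keep_max out) := by unfold Spec_compact_recent_actions; infer_instance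

-- ===== CLAIM (what is proved, stated in full; the proofs are below) =====
def Claim_equal_compact_recent_actions : Prop := ∀ (actions : List (List (String × String))) (keep_max : Int), Dom_compact_recent_actions actions keep_max → Spec_compact_recent_actions actions keep_max (compact_recent_actions actions keep_max)

-- ===== LEMMAS AND PROOFS =====

-- the association list A's newest_noisy dict holds after processing l
def pvGroups (l : List (List (String × String))) : List (String × List (String × String)) :=
  (PySem.List.dedup ((l.filter pvNoisy).map pvName)).map
    (fun n => (n, pvPick (l.filter (fun a => pvName a == n))))

-- what max(reversed(·), key=ts) yields over a :: r
def pvRes (a : List (String × String)) (r : List (List (String × String))) : List (String × String) :=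
  ((PySem.List.max? r pvTs).map (fun m => if pvTs a < pvTs m then m else a)).getD a

lemma pvTs_le_pvRes (a : List (String × String)) (r : List (List (String × String))) :
    pvTs a ≤ pvTs (pvRes a r) := by
  cases hmt : PySem.List.max? r pvTs with
  | none => simp [pvRes, hmt]
  | some m =>
    simp only [pvRes, hmt, Option.map_some, Option.getD_some]
    split_ifs with h
    · exact le_of_lt h
    · exact le_rfl

lemma max?_cons_cons (a y : List (String × String)) (t : List (List (String × String))) :
    PySem.List.max? (a :: y :: t) pvTs =
      PySem.List.max? ((if pvTs a < pvTs y then y else a) :: t) pvTs := by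
  unfold PySem.List.max?
  simp only [List.foldl_cons]
  congr 1
  show (if pvTs a < pvTs y then some y else some a) = some (if pvTs a < pvTs y then y else a)
  split_ifs <;> rfl

lemma max?_cons (r : List (List (String × String))) :
    ∀ a, PySem.List.max? (a :: r) pvTs = some (pvRes a r) := by
  induction r with
  | nil => intro a; rfl
  | cons y t ih =>
    intro a
    rw [max?_cons_cons, ih]
    congr 1
    have hR : pvRes a (y :: t) = if pvTs a < pvTs (pvRes y t) then pvRes y t else a := by
      simp [pvRes, ih y]
    rw [hR]
    by_cases hc : pvTs a < pvTs y
    · rw [if_pos hc, if_pos (lt_of_lt_of_le hc (pvTs_le_pvRes y t))]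
    · rw [if_neg hc]
      cases hmt : PySem.List.max? t pvTs with
      | none =>
        simp only [pvRes, hmt, Option.map_none, Option.getD_none]
        rw [if_neg hc]
      | some m =>
        simp only [pvRes, hmt, Option.map_some, Option.getD_some]
        by_cases hym : pvTs y < pvTs m
        · rw [if_pos hym]
        · rw [if_neg hym, if_neg hc,
            if_neg (by
              have h1 : pvTs m ≤ pvTs y := not_lt.mp hym
              have h2 : pvTs y ≤ pvTs a := not_lt.mp hc
              exact not_lt.mpr (le_trans h1 h2))]

lemma pvPick_singleton (a : List (String × String)) : pvPick [a] = a := rfl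

lemma pvPick_append_singleton (g : List (List (String × String))) (a : List (String × String))
    (hg : g ≠ []) :
    pvPick (g ++ [a]) = if pvTs (pvPick g) ≤ pvTs a then a else pvPick g := by
  have hrev : (g ++ [a]).reverse = a :: g.reverse := by simp
  cases hmg : PySem.List.max? g.reverse pvTs with
  | none =>
    exact absurd ((PySem.List.max?_eq_none_iff _ _).mp hmg) (by simp [hg])
  | some m =>
    have hpg : pvPick g = m := by simp [pvPick, hmg]
    have : pvPick (g ++ [a]) = pvRes a g.reverse := by
      rw [pvPick, hrev, max?_cons]; rfl
    rw [this, hpg]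
    simp only [pvRes, hmg, Option.map_some, Option.getD_some]
    by_cases h : pvTs a < pvTs m
    · rw [if_pos h, if_neg (not_le.mpr h)]
    · rw [if_neg h, if_pos (not_lt.mp h)]

-- noisy names are one of the two literals
lemma pvNoisy_names (b : List (String × String)) (h : pvNoisy b = true) :
    pvName b = "memory.consolidate" ∨ pvName b = "aicore.shutdown" := by
  simp only [pvNoisy, Bool.or_eq_true, beq_iff_eq] at h
  exact h

lemma mem_names (l : List (List (String × String))) (n : String)
    (h : n ∈ PySem.List.dedup ((l.filter pvNoisy).map pvName)) :
    ∃ b ∈ l, pvNoisy b = true ∧ pvName b = n := by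
  rw [PySem.List.dedup_eq_ofList, PySem.Set.mem_ofList] at h
  obtain ⟨b, hb, hn⟩ := List.mem_map.mp h
  exact ⟨b, (List.mem_filter.mp hb).1, (List.mem_filter.mp hb).2, hn⟩

lemma names_of_not_noisy (l : List (List (String × String))) (x : List (String × String))
    (hx : pvNoisy x = false) (n : String)
    (hn : n ∈ PySem.List.dedup ((l.filter pvNoisy).map pvName)) : pvName x ≠ n := by
  intro he
  obtain ⟨b, _, hb, hbn⟩ := mem_names l n hn
  have : pvNoisy x = true := by
    rcases pvNoisy_names b hb with h' | h' <;>
      simp [pvNoisy, he, ← hbn, h']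
  simp [this] at hx

lemma keys_groups (l : List (List (String × String))) :
    (PySem.Dict.mk (pvGroups l)).keys = PySem.List.dedup ((l.filter pvNoisy).map pvName) := by
  simp [pvGroups, PySem.Dict.keys_mk, List.map_map, Function.comp_def]

lemma nodup_names (l : List (List (String × String))) :
    (PySem.List.dedup ((l.filter pvNoisy).map pvName)).Nodup := by
  rw [PySem.List.dedup_eq_ofList]; exact PySem.Set.nodup_ofList _

lemma group_append (l : List (List (String × String))) (x : List (String × String)) (n : String) :
    (l ++ [x]).filter (fun a => pvName a == n) =
      l.filter (fun a => pvName a == n) ++ (if pvName x == n then [x] else []) := by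
  simp [List.filter_append, List.filter_cons]

lemma phase1 (l : List (List (String × String))) :
    l.foldl pvStepA (PySem.Dict.mk [], []) =
      (PySem.Dict.mk (pvGroups l), l.filter (fun a => !pvNoisy a)) := by
  induction l using List.reverseRecOn with
  | nil => rfl
  | append_singleton l x ih =>
    rw [List.foldl_append, ih, List.foldl_cons, List.foldl_nil]
    by_cases hnx : pvNoisy x = true
    · -- x is noisy
      have hcond : (pvName x == "memory.consolidate" || pvName x == "aicore.shutdown") = true := by
        simpa [pvNoisy] using hnx
      have hnames : (l ++ [x]).filter pvNoisy = l.filter pvNoisy ++ [x] := by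
        simp [List.filter_append, hnx]
      by_cases h0 : pvName x ∈ PySem.List.dedup ((l.filter pvNoisy).map pvName)
      · -- name already present
        have hget : (PySem.Dict.mk (pvGroups l)).get? (pvName x) =
            some (pvPick (l.filter (fun a => pvName a == pvName x))) := by
          apply PySem.Dict.get?_of_mem_items
          · exact List.mem_map.mpr ⟨pvName x, h0, rfl⟩
          · rw [keys_groups]; exact nodup_names l
        have hNamesEq : PySem.List.dedup (((l ++ [x]).filter pvNoisy).map pvName) =
            PySem.List.dedup ((l.filter pvNoisy).map pvName) := by
          rw [hnames]
          simp only [List.map_append, List.map_cons, List.map_nil]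
          rw [PySem.List.dedup_eq_ofList, PySem.Set.ofList_append_singleton,
            PySem.Set.add_of_mem (by rwa [PySem.List.dedup_eq_ofList] at h0),
            ← PySem.List.dedup_eq_ofList]
        have hgne : l.filter (fun a => pvName a == pvName x) ≠ [] := by
          obtain ⟨b, hbl, hbn, hbna⟩ := mem_names l (pvName x) h0
          intro hemp
          have : b ∈ l.filter (fun a => pvName a == pvName x) :=
            List.mem_filter.mpr ⟨hbl, by simp [hbna]⟩
          simp [hemp] at this
        have hgx : (l ++ [x]).filter (fun a => pvName a == pvName x) =
            l.filter (fun a => pvName a == pvName x) ++ [x] := by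
          rw [group_append]; simp
        unfold pvStepA
        simp only [hcond, if_true, hget]
        have hfil : (l ++ [x]).filter (fun a => !pvNoisy a) = l.filter (fun a => !pvNoisy a) := by
          simp [List.filter_append, hnx]
        by_cases hts : pvTs (pvPick (l.filter (fun a => pvName a == pvName x))) ≤ pvTs x
        · rw [if_pos hts]
          refine Prod.ext ?_ (by simpa using hfil.symm)
          apply PySem.Dict.ext
          rw [PySem.Dict.items_insert_of_contains _ _
            (by rw [PySem.Dict.contains_iff_mem_keys, keys_groups]; exact h0)]
          show (pvGroups l).map _ = pvGroups (l ++ [x])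
          unfold pvGroups
          rw [hNamesEq, List.map_map]
          apply List.map_congr_left
          intro n hn
          by_cases hne : n = pvName x
          · subst hne
            simp only [Function.comp_apply, beq_self_eq_true, if_true]
            rw [hgx, pvPick_append_singleton _ _ hgne, if_pos hts]
          · have : (pvName ·) x ≠ n := Ne.symm hne
            simp only [Function.comp_apply]
            rw [if_neg (by simpa using hne), group_append, if_neg (by simpa using (Ne.symm hne))]
            simp
        · rw [if_neg hts]
          refine Prod.ext ?_ (by simpa using hfil.symm)
          apply PySem.Dict.ext
          show pvGroups l = pvGroups (l ++ [x])
          unfold pvGroups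
          rw [hNamesEq]
          apply List.map_congr_left
          intro n hn
          by_cases hne : n = pvName x
          · subst hne
            rw [hgx, pvPick_append_singleton _ _ hgne, if_neg hts]
          · rw [group_append, if_neg (by simpa using (Ne.symm hne))]
            simp
      · -- fresh name
        have hget : (PySem.Dict.mk (pvGroups l)).get? (pvName x) = none := by
          rw [PySem.Dict.get?_eq_none_iff_not_mem_keys, keys_groups]; exact h0
        have hNamesEq : PySem.List.dedup (((l ++ [x]).filter pvNoisy).map pvName) =
            PySem.List.dedup ((l.filter pvNoisy).map pvName) ++ [pvName x] := by
          rw [hnames]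
          simp only [List.map_append, List.map_cons, List.map_nil]
          rw [PySem.List.dedup_eq_ofList, PySem.Set.ofList_append_singleton,
            PySem.Set.add_of_not_mem (by rwa [PySem.List.dedup_eq_ofList] at h0),
            ← PySem.List.dedup_eq_ofList]
        have hgempty : l.filter (fun a => pvName a == pvName x) = [] := by
          rw [List.filter_eq_nil_iff]
          intro b hbl hbn
          apply h0
          have hbnoisy : pvNoisy b = true := by
            rcases pvNoisy_names x hnx with h' | h' <;>
              simp [pvNoisy, show pvName b = pvName x from by simpa using hbn, h']
          rw [PySem.List.dedup_eq_ofList, PySem.Set.mem_ofList]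
          exact List.mem_map.mpr ⟨b, List.mem_filter.mpr ⟨hbl, hbnoisy⟩, by simpa using hbn⟩
        unfold pvStepA
        simp only [hcond, if_true, hget]
        have hfil : (l ++ [x]).filter (fun a => !pvNoisy a) = l.filter (fun a => !pvNoisy a) := by
          simp [List.filter_append, hnx]
        refine Prod.ext ?_ (by simpa using hfil.symm)
        apply PySem.Dict.ext
        rw [PySem.Dict.items_insert_of_not_contains _ _
          (by
            rw [← Bool.not_eq_true, PySem.Dict.contains_iff_mem_keys, keys_groups]
            exact h0)]
        show pvGroups l ++ [(pvName x, x)] = pvGroups (l ++ [x])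
        unfold pvGroups
        rw [hNamesEq, List.map_append]
        congr 1
        · apply List.map_congr_left
          intro n hn
          have hne : pvName x ≠ n := by
            intro he
            exact h0 (he ▸ hn)
          rw [group_append, if_neg (by simpa using hne)]
          simp
        · simp only [List.map_cons, List.map_nil]
          rw [group_append]
          simp only [beq_self_eq_true, if_true]
          rw [hgempty]
          simp [pvPick_singleton]
    · -- x is not noisy
      have hnx' : pvNoisy x = false := by simpa using hnx
      have hcond : (pvName x == "memory.consolidate" || pvName x == "aicore.shutdown") = false := by
        simpa [pvNoisy] using hnx'
      unfold pvStepA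
      simp only [hcond, Bool.false_eq_true, if_false]
      have hfilN : (l ++ [x]).filter pvNoisy = l.filter pvNoisy := by
        simp [List.filter_append, hnx']
      refine Prod.ext ?_ ?_
      · apply PySem.Dict.ext
        show pvGroups l = pvGroups (l ++ [x])
        unfold pvGroups
        rw [hfilN]
        apply List.map_congr_left
        intro n hn
        have hne := names_of_not_noisy l x hnx' n hn
        rw [group_append, if_neg (by simpa using hne)]
        simp
      · show List.filter (fun a => !pvNoisy a) l ++ [x] = _
        simp [List.filter_append, hnx']

-- A's `normal = [x for x in kept if x not in important]` is the complement filter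
lemma normal_eq_filter_not (K : List (List (String × String))) :
    K.filter (fun x => !((K.filter (fun x => pvImp x)).contains x)) =
      K.filter (fun x => !pvImp x) := by
  apply List.filter_congr
  intro x hx
  rw [List.contains_eq_mem]
  cases himp : pvImp x
  · simp [List.mem_filter, himp]
  · simp [List.mem_filter, hx, himp]

-- re-sorting a filtered, already-sorted list is the identity
lemma sorted_filter_sorted (base : List (List (String × String)))
    (p : List (String × String) → Bool) :
    PySem.List.sorted ((PySem.List.sorted base pvTs).filter p) pvTs =
      (PySem.List.sorted base pvTs).filter p :=
  PySem.List.sorted_eq_self_of_pairwise _ _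
    (List.Pairwise.sublist List.filter_sublist (PySem.List.sorted_pairwise base pvTs))

-- ===== VERDICT (by name: the statement is the Claim_ definition above) =====
theorem compact_recent_actions_spec : Claim_equal_compact_recent_actions := by
  intro actions keep_max _
  unfold Spec_compact_recent_actions
  unfold compact_recent_actions compact_recent_actions_alt
  rw [phase1]
  dsimp only
  have hvals : (PySem.Dict.mk (pvGroups actions)).values =
      (PySem.List.dedup ((actions.filter pvNoisy).map pvName)).map
        (fun n => pvPick (actions.filter (fun a => pvName a == n))) := by
    simp [PySem.Dict.values, pvGroups, List.map_map, Function.comp]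
  rw [hvals, normal_eq_filter_not, sorted_filter_sorted, sorted_filter_sorted]
  split_ifs with h
  · rfl
  · rfl
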